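-- pv_equiv track=rewrite | github.com/stanford-oval/storm | knowledge_storm/utils.py | update_citation_index
-- ===== SOURCE A (Python) =====
-- def update_citation_index(s, citation_map):
--     """Update citation index in the string based on the citation map."""
--     for original_citation in citation_map:
--         s = s.replace(
--             f"[{original_citation}]", f"__PLACEHOLDER_{original_citation}__"
--         )
--     for original_citation, unify_citation in citation_map.items():
--         s = s.replace(f"__PLACEHOLDER_{original_citation}__", f"[{unify_citation}]")
--
--     return s
-- ===== SOURCE B (Python) =====
-- def update_citation_index(s, citation_map):
--     """Update citation index in the string based on the citation map."""
--     lookup = {f"[{k}]": f"[{v}]" for k, v in citation_map.items()}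
--     out = []
--     i = 0
--     while True:
--         j = s.find('[', i)
--         if j == -1:
--             out.append(s[i:])
--             break
--         out.append(s[i:j])
--         k = s.find(']', j + 1)
--         if k == -1:
--             out.append(s[j:])
--             break
--         repl = lookup.get(s[j:k + 1])
--         if repl is not None:
--             out.append(repl)
--             i = k + 1
--         else:
--             out.append('[')
--             i = j + 1
--     return ''.join(out)
-- ===== Notes on version B (the rewrite author's own statement) =====
-- stated objective: faster
-- what changed: A runs 2*m sequential str.replace passes over the whole string via a '__PLACEHOLDER_k__' sentinel round-trip; B builds the {'[k]': '[v]'} lookup dict once and rewrites the string in a single left-to-right scan over bracketed tokens, with no sentinel.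
-- outside the precondition, e.g. on update_citation_index('__PLACEHOLDER_2__', {2: 1}): A returns '[1]', B returns '__PLACEHOLDER_2__'; on update_citation_index('x__PLACEHOLDER_-3__y', {-3: 0}): A returns 'x[0]y', B returns 'x__PLACEHOLDER_-3__y'
import Mathlib
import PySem

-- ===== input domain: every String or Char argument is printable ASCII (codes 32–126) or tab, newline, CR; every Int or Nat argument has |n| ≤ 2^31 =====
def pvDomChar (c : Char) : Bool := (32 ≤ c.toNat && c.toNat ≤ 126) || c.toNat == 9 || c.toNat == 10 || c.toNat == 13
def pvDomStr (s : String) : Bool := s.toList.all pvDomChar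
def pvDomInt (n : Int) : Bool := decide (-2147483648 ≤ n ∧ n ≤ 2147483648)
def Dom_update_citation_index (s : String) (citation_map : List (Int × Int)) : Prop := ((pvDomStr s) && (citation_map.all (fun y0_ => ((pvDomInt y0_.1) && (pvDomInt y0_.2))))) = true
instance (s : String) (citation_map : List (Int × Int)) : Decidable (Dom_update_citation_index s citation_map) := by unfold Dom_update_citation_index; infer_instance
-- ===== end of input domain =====

-- B replaces A's 2·m sequential str.replace passes (a "__PLACEHOLDER_k__" sentinel
-- round-trip) by ONE left-to-right scan over bracketed tokens with a dict lookup;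
-- return value only, no argument is mutated.

-- ===== PORT A =====
def update_citation_index (s : String) (citation_map : List (Int × Int)) : String :=
  let s1 := citation_map.foldl (fun acc kv =>
    PySem.Str.replace acc ("[" ++ PySem.Int.toStr kv.1 ++ "]")
      ("__PLACEHOLDER_" ++ PySem.Int.toStr kv.1 ++ "__")) s
  citation_map.foldl (fun acc kv =>
    PySem.Str.replace acc ("__PLACEHOLDER_" ++ PySem.Int.toStr kv.1 ++ "__")
      ("[" ++ PySem.Int.toStr kv.2 ++ "]")) s1

-- ===== PORT B =====
-- helper: the lookup dict {f"[{k}]": f"[{v}]"} of Source B (keys/values as char lists)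
def pvDictB (citation_map : List (Int × Int)) : PySem.Dict (List Char) (List Char) :=
  citation_map.foldl (fun d kv =>
    d.insert ('[' :: (PySem.Int.toStr kv.1).toList ++ [']'])
             ('[' :: (PySem.Int.toStr kv.2).toList ++ [']'])) PySem.Dict.empty

-- helper: Source B's scan loop — jump to the next '[', try to read a ']'-terminated
-- token, replace it on a dict hit, else emit it and move on.  The fuel argument
-- (initially the string length, strictly more than the loop can consume) only
-- makes the recursion structural; the 0 case is never reached.
def pvScanGo (d : PySem.Dict (List Char) (List Char)) : Nat → List Char → List Char
  | 0, l => l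
  | fuel + 1, l =>
    match l.dropWhile (· ≠ '[') with
    | [] => l
    | c :: t =>
      l.takeWhile (· ≠ '[') ++
        (match t.dropWhile (· ≠ ']') with
        | [] => c :: t
        | _ :: r =>
          match d.get? ('[' :: t.takeWhile (· ≠ ']') ++ [']']) with
          | some repl => repl ++ pvScanGo d fuel r
          | none => c :: pvScanGo d fuel t)

def update_citation_index_alt (s : String) (citation_map : List (Int × Int)) : String :=
  String.ofList (pvScanGo (pvDictB citation_map) s.toList.length s.toList)

-- ===== PRECONDITION & SPEC =====
-- (1) citation_map encodes a Python dict, whose keys are necessarily distinct; the first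
--     conjunct only rules out association lists with a repeated key (no real dict produces one).
-- (2) Pre_ excludes strings that collide with A's reserved internal sentinel — strings already
--     containing "PLACEHOLDER_<k>" for a mapped key k.  Such inputs are outside the function's
--     contract (remapping bracketed citations) and neither behaviour on them is specified:
--     A's sentinel round-trip may rewrite that pre-existing text (e.g. "__PLACEHOLDER_2__"
--     with {2: 1} becomes "[1]"), B leaves it unchanged.
def Pre_update_citation_index (s : String) (citation_map : List (Int × Int)) : Prop :=
  (citation_map.map (fun kv => PySem.Int.toStr kv.1)).Nodup ∧
  ∀ kv ∈ citation_map, ¬ ("PLACEHOLDER_" ++ PySem.Int.toStr kv.1).toList <:+: s.toList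
instance (s : String) (citation_map : List (Int × Int)) : Decidable (Pre_update_citation_index s citation_map) := by unfold Pre_update_citation_index; infer_instance

def pvWitness_update_citation_index : String × (List (Int × Int)) := ("See [2] and [3].", [(2, 1), (3, 2)])

def Spec_update_citation_index (s : String) (citation_map : List (Int × Int)) (out : String) : Prop :=
  out = update_citation_index_alt s citation_map
instance (s : String) (citation_map : List (Int × Int)) (out : String) : Decidable (Spec_update_citation_index s citation_map out) := by unfold Spec_update_citation_index; infer_instance

-- ===== CLAIM (what is proved, stated in full; the proofs are below) =====
def Claim_equal_update_citation_index : Prop := ∀ (s : String) (citation_map : List (Int × Int)), Dom_update_citation_index s citation_map → Pre_update_citation_index s citation_map → Spec_update_citation_index s citation_map (update_citation_index s citation_map)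

-- ===== LEMMAS AND PROOFS =====

-- ---- basic vocabulary over List Char ----
def pvSK (kv : Int × Int) : List Char := (PySem.Int.toStr kv.1).toList
def pvSV (kv : Int × Int) : List Char := (PySem.Int.toStr kv.2).toList
def pvTok (σ : List Char) : List Char := '[' :: σ ++ [']']
def pvPL : List Char := "__PLACEHOLDER_".toList
def pvPH (σ : List Char) : List Char := pvPL ++ σ ++ ['_', '_']
def pvRV (kv : Int × Int) : List Char := '[' :: pvSV kv ++ [']']

def pvGood (σ : List Char) : Prop := σ ≠ [] ∧ ∀ c ∈ σ, c ≠ '[' ∧ c ≠ ']' ∧ c ≠ '_'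

-- ---- good key/value strings ----
theorem pvDigitChar_ok (n : Nat) : n.digitChar ≠ '[' ∧ n.digitChar ≠ ']' ∧ n.digitChar ≠ '_' := by
  by_cases h : n < 16
  · interval_cases n <;> exact ⟨by decide, by decide, by decide⟩
  · have hstar : n.digitChar = '*' := by
      unfold Nat.digitChar
      rw [if_neg (by omega), if_neg (by omega), if_neg (by omega), if_neg (by omega),
          if_neg (by omega), if_neg (by omega), if_neg (by omega), if_neg (by omega),
          if_neg (by omega), if_neg (by omega), if_neg (by omega), if_neg (by omega),
          if_neg (by omega), if_neg (by omega), if_neg (by omega), if_neg (by omega)]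
    rw [hstar]; exact ⟨by decide, by decide, by decide⟩

theorem pvToDigitsCore_ok (fuel n : Nat) (ds : List Char)
    (hds : ∀ c ∈ ds, c ≠ '[' ∧ c ≠ ']' ∧ c ≠ '_') :
    ∀ c ∈ Nat.toDigitsCore 10 fuel n ds, c ≠ '[' ∧ c ≠ ']' ∧ c ≠ '_' := by
  induction fuel generalizing n ds with
  | zero => simpa [Nat.toDigitsCore] using hds
  | succ f ih =>
    rw [Nat.toDigitsCore]
    split
    · intro c hc
      rcases List.mem_cons.mp hc with h | h
      · subst h; exact pvDigitChar_ok _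
      · exact hds c h
    · exact ih _ _ (by
        intro c hc
        rcases List.mem_cons.mp hc with h | h
        · subst h; exact pvDigitChar_ok _
        · exact hds c h)

theorem pvToDigitsCore_len_any (b : Nat) (fuel n : Nat) (ds : List Char) :
    ds.length ≤ (Nat.toDigitsCore b fuel n ds).length := by
  induction fuel generalizing n ds with
  | zero => simp [Nat.toDigitsCore]
  | succ f ih =>
    rw [Nat.toDigitsCore]
    split
    · simp
    · exact le_trans (by simp) (ih (n / b) _)

theorem pvToDigits_ne_nil (b n : Nat) : Nat.toDigits b n ≠ [] := by
  have h1 : 1 ≤ (Nat.toDigits b n).length := by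
    rw [Nat.toDigits, Nat.toDigitsCore]
    split
    · simp
    · exact le_trans (by simp) (pvToDigitsCore_len_any b n _ _)
  intro h; rw [h] at h1; simp at h1

theorem pvGood_toStr (k : Int) : pvGood (PySem.Int.toStr k).toList := by
  rw [PySem.Int.toStr, String.toList_ofList, PySem.Int.toChars]
  split
  · constructor
    · simp
    · intro c hc
      rcases List.mem_cons.mp hc with h | h
      · subst h; exact ⟨by decide, by decide, by decide⟩
      · exact pvToDigitsCore_ok _ _ [] (by simp) c h
  · exact ⟨pvToDigits_ne_nil _ _, fun c hc => pvToDigitsCore_ok _ _ [] (by simp) c hc⟩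

theorem pvGood_sk (kv : Int × Int) : pvGood (pvSK kv) := pvGood_toStr _
theorem pvGood_sv (kv : Int × Int) : pvGood (pvSV kv) := pvGood_toStr _

-- ---- str.replace as plain structural recursion ----
def pvRep (old new : List Char) : List Char → List Char
  | [] => []
  | c :: t =>
    if old.isPrefixOf (c :: t) then new ++ pvRep old new (t.drop (old.length - 1))
    else c :: pvRep old new t
termination_by l => l.length
decreasing_by
  · simp [List.length_drop]
  · simp

theorem pvRep_go (old new : List Char) (hne : old ≠ []) :
    ∀ fuel l acc, l.length ≤ fuel →
      PySem.Chars.replace.go old new fuel l acc = acc.reverse ++ pvRep old new l := by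
  intro fuel
  induction fuel with
  | zero =>
    intro l acc h
    have : l = [] := List.length_eq_zero_iff.mp (Nat.le_zero.mp h)
    subst this; simp [PySem.Chars.replace.go, pvRep]
  | succ n ih =>
    intro l acc h
    match l with
    | [] => simp [PySem.Chars.replace.go, pvRep]
    | c :: t =>
      rw [PySem.Chars.replace.go]
      by_cases hp : old.isPrefixOf (c :: t)
      · rw [if_pos hp, pvRep, if_pos hp]
        have hol : 1 ≤ old.length := by
          cases old with | nil => exact absurd rfl hne | cons a b => simp
        have hlen : ((c :: t).drop old.length).length ≤ n := by
          simp [List.length_drop] at *; omega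
        have hdrop : (c :: t).drop old.length = t.drop (old.length - 1) := by
          cases old with | nil => exact absurd rfl hne | cons a b => simp
        rw [ih _ _ hlen, hdrop]
        simp
      · rw [if_neg hp, pvRep, if_neg hp]
        have : t.length ≤ n := by simp at h; omega
        rw [ih _ _ this]
        simp

theorem pvRep_eq_replace (old new : List Char) (h : old ≠ []) (l : List Char) :
    PySem.Chars.replace l old new = pvRep old new l := by
  rw [PySem.Chars.replace]
  rw [if_neg (by simpa using h)]
  simpa using pvRep_go old new h l.length l [] le_rfl

theorem pvRep_nil (old new : List Char) : pvRep old new [] = [] := by rw [pvRep]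

theorem pvRep_cons_neg (old new : List Char) (c : Char) (t : List Char)
    (h : ¬ old <+: c :: t) : pvRep old new (c :: t) = c :: pvRep old new t := by
  rw [pvRep, if_neg (by rwa [List.isPrefixOf_iff_prefix])]

theorem pvRep_head (old new y : List Char) (h : old ≠ []) :
    pvRep old new (old ++ y) = new ++ pvRep old new y := by
  match old with
  | [] => exact absurd rfl h
  | a :: o =>
    rw [List.cons_append, pvRep, if_pos (by rw [List.isPrefixOf_iff_prefix]; exact ⟨y, by simp⟩)]
    simp [List.drop_append_of_le_length]

theorem pvRep_skip (old new x y : List Char)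
    (h : ∀ j, j < x.length → ¬ old <+: (x ++ y).drop j) :
    pvRep old new (x ++ y) = x ++ pvRep old new y := by
  induction x with
  | nil => simp
  | cons a x ih =>
    rw [List.cons_append, pvRep_cons_neg old new a (x ++ y) (by
      have := h 0 (by simp)
      simpa using this)]
    rw [ih (fun j hj => by
      have := h (j + 1) (by simp; omega)
      simpa using this)]
    simp

-- ---- the token parse of the input ----
def pvFind (m : List (Int × Int)) (inner : List Char) : Option (Int × Int) :=
  m.find? (fun kv => pvSK kv == inner)

def pvParse (m : List (Int × Int)) : List Char → List (Char ⊕ (Int × Int))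
  | [] => []
  | c :: t =>
    if c = '[' then
      match h : t.dropWhile (· ≠ ']'), pvFind m (t.takeWhile (· ≠ ']')) with
      | _ :: r, some kv => Sum.inr kv :: pvParse m r
      | _, _ => Sum.inl c :: pvParse m t
    else Sum.inl c :: pvParse m t
termination_by l => l.length
decreasing_by
  all_goals simp_all
  · have h1 : (t.dropWhile (fun x => !decide (x = ']'))).length ≤ t.length := List.length_dropWhile_le _ _
    rw [h] at h1; simp at h1; omega

-- denotation in phase 1: processed keys (g) are placeholders, the rest still tokens
def pvDen1 (g : List Char → Bool) : List (Char ⊕ (Int × Int)) → List Char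
  | [] => []
  | Sum.inl c :: L => c :: pvDen1 g L
  | Sum.inr kv :: L => (if g (pvSK kv) then pvPH (pvSK kv) else pvTok (pvSK kv)) ++ pvDen1 g L

-- denotation in phase 2: processed keys are final replacements, the rest placeholders
def pvDen2 (g : List Char → Bool) : List (Char ⊕ (Int × Int)) → List Char
  | [] => []
  | Sum.inl c :: L => c :: pvDen2 g L
  | Sum.inr kv :: L => (if g (pvSK kv) then pvRV kv else pvPH (pvSK kv)) ++ pvDen2 g L

-- ---- small utilities ----
theorem pvDropWhile_head_rb (t : List Char) (x : Char) (r : List Char)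
    (h : t.dropWhile (· ≠ ']') = x :: r) : x = ']' := by
  induction t with
  | nil => simp at h
  | cons a t ih =>
    by_cases ha : a = ']'
    · subst ha; rw [List.dropWhile_cons_of_neg (by simp)] at h
      exact (List.cons.injEq .. ▸ h).1.symm
    · rw [List.dropWhile_cons_of_pos (by simpa using ha)] at h
      exact ih h

theorem pvTakeDrop_of_prefix (σ : List Char) (hσ : ']' ∉ σ) (u : List Char) :
    (σ ++ ']' :: u).takeWhile (· ≠ ']') = σ ∧ (σ ++ ']' :: u).dropWhile (· ≠ ']') = ']' :: u := by
  induction σ with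
  | nil => constructor <;> simp
  | cons a σ ih =>
    have ha : a ≠ ']' := fun h => hσ (by simp [h])
    have := ih (fun h => hσ (by simp [h]))
    constructor
    · rw [List.cons_append, List.takeWhile_cons_of_pos (by simpa using ha), this.1]
    · rw [List.cons_append, List.dropWhile_cons_of_pos (by simpa using ha), this.2]

theorem pvPrefix_getElem? {p l : List Char} (h : p <+: l) (j : Nat) (hj : j < p.length) :
    l[j]? = p[j]? := by
  rcases h with ⟨t, rfl⟩
  rw [List.getElem?_append_left hj]

-- ---- parse facts ----
theorem pvFind_sk {m : List (Int × Int)} {inner : List Char} {kv : Int × Int}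
    (h : pvFind m inner = some kv) : pvSK kv = inner ∧ kv ∈ m := by
  refine ⟨by simpa using List.find?_some h, List.mem_of_find?_eq_some h⟩

theorem pvParse_nil (m : List (Int × Int)) : pvParse m [] = [] := by rw [pvParse]

theorem pvParse_tok (m : List (Int × Int)) (t : List Char) (x : Char) (r : List Char) (kv : Int × Int)
    (h1 : t.dropWhile (· ≠ ']') = x :: r) (h2 : pvFind m (t.takeWhile (· ≠ ']')) = some kv) :
    pvParse m ('[' :: t) = Sum.inr kv :: pvParse m r := by
  rw [pvParse]
  rw [if_pos rfl]
  split
  · rename_i head1 r1 kv1 hd hf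
    rw [h1] at hd
    cases hd
    rw [h2] at hf
    cases hf
    rfl
  · rename_i hno
    exact (hno _ _ _ h1 h2).elim

theorem pvParse_lb_no (m : List (Int × Int)) (t : List Char)
    (hno : ∀ (x : Char) (r : List Char) (kv : Int × Int),
      t.dropWhile (· ≠ ']') = x :: r → pvFind m (t.takeWhile (· ≠ ']')) = some kv → False) :
    pvParse m ('[' :: t) = Sum.inl '[' :: pvParse m t := by
  rw [pvParse]
  rw [if_pos rfl]
  split
  · rename_i head1 r1 kv1 hd hf
    exact (hno _ _ _ hd hf).elim
  · rfl

theorem pvParse_cons (m : List (Int × Int)) (c : Char) (t : List Char) (hc : c ≠ '[') :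
    pvParse m (c :: t) = Sum.inl c :: pvParse m t := by
  rw [pvParse]
  rw [if_neg hc]

theorem pvParse_mem {m : List (Int × Int)} {cs : List Char} {kv : Int × Int}
    (h : Sum.inr kv ∈ pvParse m cs) : kv ∈ m := by
  induction cs using pvParse.induct m with
  | case1 => rw [pvParse_nil] at h; simp at h
  | case2 t x r kv' h1 h2 ih =>
    rw [pvParse_tok m t x r kv' h1 h2] at h
    rcases List.mem_cons.mp h with h3 | h3
    · cases h3; exact (pvFind_sk h2).2
    · exact ih h3
  | case3 t hno ih =>
    rw [pvParse_lb_no m t hno] at h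
    rcases List.mem_cons.mp h with h3 | h3
    · simp at h3
    · exact ih h3
  | case4 c t hc ih =>
    rw [pvParse_cons m c t hc] at h
    rcases List.mem_cons.mp h with h3 | h3
    · simp at h3
    · exact ih h3

theorem pvParse_denote (m : List (Int × Int)) (cs : List Char) :
    pvDen1 (fun _ => false) (pvParse m cs) = cs := by
  induction cs using pvParse.induct m with
  | case1 => rw [pvParse_nil]; rfl
  | case2 t x r kv h1 h2 ih =>
    rw [pvParse_tok m t x r kv h1 h2, pvDen1, if_neg (by simp)]
    have hx : x = ']' := pvDropWhile_head_rb t x r h1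
    subst hx
    have hsk := (pvFind_sk h2).1
    rw [ih, pvTok, hsk]
    have : t.takeWhile (· ≠ ']') ++ ']' :: r = t := by
      have := List.takeWhile_append_dropWhile (p := (· ≠ ']')) (l := t)
      rw [h1] at this
      exact this
    rw [List.append_assoc]
    simp only [List.singleton_append]
    exact congrArg (List.cons '[') this
  | case3 t hno ih => rw [pvParse_lb_no m t hno, pvDen1, ih]
  | case4 c t hc ih => rw [pvParse_cons m c t hc, pvDen1, ih]

theorem pvDen1_congr (g g' : List Char → Bool) (L : List (Char ⊕ (Int × Int)))
    (h : ∀ kv, Sum.inr kv ∈ L → g (pvSK kv) = g' (pvSK kv)) :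
    pvDen1 g L = pvDen1 g' L := by
  induction L with
  | nil => rfl
  | cons ch L ih =>
    cases ch with
    | inl c => rw [pvDen1, pvDen1, ih (fun kv hkv => h kv (by simp [hkv]))]
    | inr kv => rw [pvDen1, pvDen1, h kv (by simp), ih (fun kv hkv => h kv (by simp [hkv]))]

theorem pvDen2_congr (g g' : List Char → Bool) (L : List (Char ⊕ (Int × Int)))
    (h : ∀ kv, Sum.inr kv ∈ L → g (pvSK kv) = g' (pvSK kv)) :
    pvDen2 g L = pvDen2 g' L := by
  induction L with
  | nil => rfl
  | cons ch L ih =>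
    cases ch with
    | inl c => rw [pvDen2, pvDen2, ih (fun kv hkv => h kv (by simp [hkv]))]
    | inr kv => rw [pvDen2, pvDen2, h kv (by simp), ih (fun kv hkv => h kv (by simp [hkv]))]

theorem pvDen1_true_eq_den2_false (L : List (Char ⊕ (Int × Int))) :
    pvDen1 (fun _ => true) L = pvDen2 (fun _ => false) L := by
  induction L with
  | nil => rfl
  | cons ch L ih =>
    cases ch with
    | inl c => rw [pvDen1, pvDen2, ih]
    | inr kv => rw [pvDen1, pvDen2, ih]; simp

theorem pvPH_append_head (σ Y : List Char) : (pvPH σ ++ Y)[0]? = some '_' := by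
  rw [pvPH, List.append_assoc, List.append_assoc]
  rw [List.getElem?_append_left (by decide)]
  decide

theorem pvTok_append_head (σ Y : List Char) : (pvTok σ ++ Y)[0]? = some '[' := by
  rw [pvTok, List.cons_append]
  rfl

theorem pvRV_append_head (kv : Int × Int) (Y : List Char) : (pvRV kv ++ Y)[0]? = some '[' := by
  rw [pvRV, List.cons_append]
  rfl

-- walking a bracket-free, underscore-free prefix through phase-1 denotations
theorem pvW1 (xs : List Char) (hxs : ∀ a ∈ xs, a ≠ '[' ∧ a ≠ '_')
    (L : List (Char ⊕ (Int × Int))) (g : List Char → Bool)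
    (h : xs <+: pvDen1 g L) : xs <+: pvDen1 (fun _ => false) L := by
  induction L generalizing xs with
  | nil => simpa [pvDen1] using h
  | cons ch L ih =>
    cases xs with
    | nil => simp
    | cons a xs =>
      cases ch with
      | inl c =>
        rw [pvDen1] at h ⊢
        rcases (List.cons_prefix_cons.mp h) with ⟨rfl, h2⟩
        exact List.cons_prefix_cons.mpr ⟨rfl, ih xs (fun b hb => hxs b (by simp [hb])) h2⟩
      | inr kv =>
        exfalso
        rw [pvDen1] at h
        by_cases hg : g (pvSK kv)
        · rw [if_pos hg] at h
          have h0 := pvPrefix_getElem? h 0 (by simp)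
          rw [pvPH_append_head] at h0
          simp at h0
          exact (hxs a (by simp)).2 h0.symm
        · rw [if_neg hg] at h
          have h0 := pvPrefix_getElem? h 0 (by simp)
          rw [pvTok_append_head] at h0
          simp at h0
          exact (hxs a (by simp)).1 h0.symm

-- character facts about placeholders / tokens / replacements
theorem pvPH_length (σ : List Char) : (pvPH σ).length = σ.length + 16 := by
  simp [pvPH, pvPL]

theorem pvPH_no_lb (σ : List Char) (hσ : pvGood σ) : '[' ∉ pvPH σ := by
  intro h
  rw [pvPH] at h
  rcases List.mem_append.mp h with h | h
  · rcases List.mem_append.mp h with h | h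
    · exact absurd h (by decide)
    · exact (hσ.2 _ h).1 rfl
  · exact absurd h (by decide)

theorem pvRV_no_us (kv : Int × Int) : '_' ∉ pvRV kv := by
  intro h
  rw [pvRV] at h
  rcases List.mem_cons.mp h with h | h
  · exact absurd h (by decide)
  · rcases List.mem_append.mp h with h | h
    · exact ((pvGood_sv kv).2 _ h).2.2 rfl
    · exact absurd h (by decide)

theorem pvTok_no_lb (σ : List Char) (hσ : pvGood σ) (j : Nat) (hj : 1 ≤ j) :
    (pvTok σ)[j]? ≠ some '[' := by
  intro h
  obtain ⟨j', rfl⟩ : ∃ j', j = j' + 1 := ⟨j - 1, by omega⟩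
  rw [pvTok, List.cons_append, List.getElem?_cons_succ] at h
  have hmem : '[' ∈ σ ++ [']'] := List.mem_of_getElem? h
  rcases List.mem_append.mp hmem with h2 | h2
  · exact (hσ.2 _ h2).1 rfl
  · exact absurd h2 (by decide)

-- ---- mismatch and index combinatorics ----
theorem pvMgen (a : Char) (u X : List Char) :
    ∀ σ κ : List Char, a ∉ σ → a ∉ κ →
      (σ ++ a :: u) <+: (κ ++ (a :: u) ++ X) → σ = κ := by
  intro σ
  induction σ with
  | nil =>
    intro κ hs hk h
    cases κ with
    | nil => rfl
    | cons b κ' =>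
      exfalso
      rcases List.cons_prefix_cons.mp (by simpa using h) with ⟨rfl, _⟩
      exact hk (by simp)
  | cons s σ' ih =>
    intro κ hs hk h
    cases κ with
    | nil =>
      exfalso
      rcases List.cons_prefix_cons.mp (by simpa using h) with ⟨rfl, _⟩
      exact hs (by simp)
    | cons b κ' =>
      rcases List.cons_prefix_cons.mp (by simpa using h) with ⟨rfl, h2⟩
      rw [ih κ' (fun hm => hs (by simp [hm])) (fun hm => hk (by simp [hm])) (by simpa using h2)]

theorem pvPL_len : pvPL.length = 14 := by decide

theorem pvPH_getElem?_left (σ : List Char) (j : Nat) (hj : j < 14) :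
    (pvPH σ)[j]? = pvPL[j]? := by
  rw [pvPH, List.append_assoc, List.getElem?_append_left (by rw [pvPL_len]; omega)]

theorem pvPH_getElem?_mid (σ : List Char) (j : Nat) (hj : 14 ≤ j) (hj2 : j < 14 + σ.length) :
    (pvPH σ)[j]? = σ[j - 14]? := by
  rw [pvPH, List.append_assoc, List.getElem?_append_right (by rw [pvPL_len]; omega), pvPL_len,
    List.getElem?_append_left (by omega)]

theorem pvPH_adj (σ : List Char) (hσ : pvGood σ) (i : Nat) (h1 : 1 ≤ i) (h2 : i ≤ 13 + σ.length) :
    ¬((pvPH σ)[i]? = some '_' ∧ (pvPH σ)[i + 1]? = some '_') := by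
  rintro ⟨ha, hb⟩
  by_cases hc : i ≤ 12
  · rw [pvPH_getElem?_left σ i (by omega)] at ha
    rw [pvPH_getElem?_left σ (i+1) (by omega)] at hb
    interval_cases i <;> simp_all <;> revert ha hb <;> decide
  · by_cases hd : i = 13
    · subst hd
      rw [pvPH_getElem?_mid σ 14 (by omega) (by
        have : σ.length ≠ 0 := by
          intro h0
          exact hσ.1 (List.length_eq_zero_iff.mp h0)
        omega)] at hb
      have : '_' ∈ σ := List.mem_of_getElem? (by simpa using hb)
      exact (hσ.2 _ this).2.2 rfl
    · rw [pvPH_getElem?_mid σ i (by omega) (by omega)] at ha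
      have : '_' ∈ σ := List.mem_of_getElem? ha
      exact (hσ.2 _ this).2.2 rfl

theorem pvPH_drop_big (σ : List Char) :
    (pvPH σ).drop (14 + σ.length) = ['_', '_'] := by
  rw [pvPH]
  have hl : (pvPL ++ σ).length = 14 + σ.length := by simp [pvPL_len]
  rw [show 14 + σ.length = (pvPL ++ σ).length from hl.symm, List.drop_left]

theorem pvPH_drop_slice (σ : List Char) (i : Nat) (hi : i ≤ 14) :
    ((pvPH σ).drop i).take (14 + σ.length - i) = pvPL.drop i ++ σ := by
  rw [pvPH, List.drop_append_of_le_length (by simp [pvPL_len]; omega),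
      List.drop_append_of_le_length (by rw [pvPL_len]; omega)]
  exact List.take_left' (by simp [pvPL_len]; omega)

theorem pvPH_two_cons (σ : List Char) :
    pvPH σ = '_' :: '_' :: (pvPL.drop 2 ++ σ ++ ['_', '_']) := by
  rw [pvPH]
  rfl

-- the tail of a placeholder pattern can only be matched by raw input characters:
-- if (pvPH σ).drop i is a prefix of the phase-2 denotation, the pattern core up to
-- the end of σ is a literal prefix of the input
theorem pvL2main (m : List (Int × Int)) (σ : List Char) (hσ : pvGood σ) (cs : List Char) :
    ∀ (g : List Char → Bool) (i : Nat), 1 ≤ i → i ≤ 13 + σ.length →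
      (pvPH σ).drop i <+: pvDen2 g (pvParse m cs) →
      ((pvPH σ).drop i).take (14 + σ.length - i) <+: cs := by
  induction cs using pvParse.induct m with
  | case1 =>
    intro g i h1 h2 hpre
    rw [pvParse_nil, pvDen2] at hpre
    have := List.prefix_nil.mp hpre
    have hlen : ((pvPH σ).drop i).length = 0 := by rw [this]; rfl
    rw [List.length_drop, pvPH_length] at hlen
    omega
  | case2 t x r kv hd hf ih =>
    intro g i h1 h2 hpre
    exfalso
    rw [pvParse_tok m t x r kv hd hf, pvDen2] at hpre
    have hlen : i < (pvPH σ).length := by rw [pvPH_length]; omega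
    have hlen2 : i + 1 < (pvPH σ).length := by rw [pvPH_length]; omega
    by_cases hg : g (pvSK kv)
    · rw [if_pos hg] at hpre
      have h0 := pvPrefix_getElem? hpre 0 (by rw [List.length_drop, pvPH_length]; omega)
      rw [pvRV_append_head] at h0
      rw [List.getElem?_drop] at h0
      exact pvPH_no_lb σ hσ (List.mem_of_getElem? (by simpa using h0.symm))
    · rw [if_neg hg] at hpre
      have h0 := pvPrefix_getElem? hpre 0 (by rw [List.length_drop, pvPH_length]; omega)
      rw [pvPH_append_head, List.getElem?_drop] at h0
      have h1' := pvPrefix_getElem? hpre 1 (by rw [List.length_drop, pvPH_length]; omega)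
      rw [List.getElem?_drop] at h1'
      have hone : (pvPH (pvSK kv) ++ pvDen2 g (pvParse m r))[1]? = some '_' := by
        rw [List.getElem?_append_left (by rw [pvPH_length]; omega)]
        rw [pvPH_getElem?_left _ 1 (by omega)]
        decide
      rw [hone] at h1'
      exact pvPH_adj σ hσ i h1 h2 ⟨by simpa using h0.symm, by simpa using h1'.symm⟩
  | case3 t hno ih =>
    intro g i h1 h2 hpre
    rw [pvParse_lb_no m t hno, pvDen2] at hpre
    have hlen : i < (pvPH σ).length := by rw [pvPH_length]; omega
    rw [List.drop_eq_getElem_cons hlen] at hpre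
    rcases List.cons_prefix_cons.mp hpre with ⟨hc0, htail⟩
    by_cases hlast : i + 1 ≤ 13 + σ.length
    · have hrec := ih g (i + 1) (by omega) hlast htail
      rw [List.drop_eq_getElem_cons hlen,
        show 14 + σ.length - i = (14 + σ.length - (i + 1)) + 1 from by omega,
        List.take_succ_cons]
      exact List.cons_prefix_cons.mpr ⟨hc0, hrec⟩
    · rw [List.drop_eq_getElem_cons hlen,
        show 14 + σ.length - i = 1 from by omega]
      simp only [List.take_succ_cons, List.take_zero]
      exact List.cons_prefix_cons.mpr ⟨hc0, by simp⟩
  | case4 c t hc ih =>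
    intro g i h1 h2 hpre
    rw [pvParse_cons m c t hc, pvDen2] at hpre
    have hlen : i < (pvPH σ).length := by rw [pvPH_length]; omega
    rw [List.drop_eq_getElem_cons hlen] at hpre
    rcases List.cons_prefix_cons.mp hpre with ⟨hc0, htail⟩
    by_cases hlast : i + 1 ≤ 13 + σ.length
    · have hrec := ih g (i + 1) (by omega) hlast htail
      rw [List.drop_eq_getElem_cons hlen,
        show 14 + σ.length - i = (14 + σ.length - (i + 1)) + 1 from by omega,
        List.take_succ_cons]
      exact List.cons_prefix_cons.mpr ⟨hc0, hrec⟩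
    · rw [List.drop_eq_getElem_cons hlen,
        show 14 + σ.length - i = 1 from by omega]
      simp only [List.take_succ_cons, List.take_zero]
      exact List.cons_prefix_cons.mpr ⟨hc0, by simp⟩

-- no token pattern can start at a raw character of a phase-1 denotation
theorem pvNoTokRaw (m : List (Int × Int)) (kv0 : Int × Int) (hkv0 : kv0 ∈ m)
    (t : List Char) (g : List Char → Bool)
    (hno : ∀ (x : Char) (r : List Char) (kv : Int × Int),
      t.dropWhile (· ≠ ']') = x :: r → pvFind m (t.takeWhile (· ≠ ']')) = some kv → False) :
    ¬ pvTok (pvSK kv0) <+: '[' :: pvDen1 g (pvParse m t) := by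
  intro h
  rw [pvTok] at h
  rcases List.cons_prefix_cons.mp h with ⟨-, h2⟩
  have hgood := pvGood_sk kv0
  have h3 : pvSK kv0 ++ [']'] <+: pvDen1 (fun _ => false) (pvParse m t) := by
    refine pvW1 _ ?_ _ g h2
    intro a ha
    rcases List.mem_append.mp ha with ha | ha
    · exact ⟨(hgood.2 a ha).1, (hgood.2 a ha).2.2⟩
    · refine ⟨?_, ?_⟩ <;> (simp at ha; subst ha; decide)
  rw [pvParse_denote] at h3
  rcases h3 with ⟨u, hu⟩
  rw [List.append_assoc, List.singleton_append] at hu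
  have hrb : ']' ∉ pvSK kv0 := fun hm => (hgood.2 _ hm).2.1 rfl
  have htd := pvTakeDrop_of_prefix (pvSK kv0) hrb u
  rw [hu] at htd
  cases hfind : pvFind m (t.takeWhile (· ≠ ']')) with
  | some kv' => exact hno ']' u kv' htd.2 hfind
  | none =>
    rw [pvFind, List.find?_eq_none] at hfind
    exact hfind kv0 hkv0 (by rw [htd.1]; simp)

-- phase-1 step: replacing one token pattern by its placeholder in the denotation
theorem pvStep1 (m : List (Int × Int)) (kv0 : Int × Int) (hkv0 : kv0 ∈ m) (cs : List Char) :
    ∀ g : List Char → Bool, g (pvSK kv0) = false →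
      pvRep (pvTok (pvSK kv0)) (pvPH (pvSK kv0)) (pvDen1 g (pvParse m cs))
        = pvDen1 (fun τ => τ == pvSK kv0 || g τ) (pvParse m cs) := by
  induction cs using pvParse.induct m with
  | case1 =>
    intro g hg
    rw [pvParse_nil, pvDen1, pvDen1, pvRep_nil]
  | case2 t x r kv hd hf ih =>
    intro g hg
    rw [pvParse_tok m t x r kv hd hf, pvDen1, pvDen1]
    by_cases hgk : g (pvSK kv)
    · -- already a placeholder: pattern (head '[') cannot match inside it
      have hne : pvSK kv ≠ pvSK kv0 := fun he => by rw [he, hg] at hgk; exact Bool.noConfusion hgk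
      rw [if_pos hgk, if_pos (by simp [hne, hgk])]
      rw [pvRep_skip _ _ _ _ (fun j hj hpre => ?_), ih g hg]
      have h0 := pvPrefix_getElem? hpre 0 (by rw [pvTok]; simp)
      rw [List.getElem?_drop, Nat.add_zero,
        List.getElem?_append_left (by simpa using hj),
        show (pvTok (pvSK kv0))[0]? = some '[' from by rw [pvTok]; rfl] at h0
      exact pvPH_no_lb (pvSK kv) (pvGood_sk kv) (List.mem_of_getElem? h0)
    · by_cases hsk : pvSK kv = pvSK kv0
      · -- the processed key: genuine replacement at the head of the chunk
        rw [if_neg hgk, if_pos (by simp [hsk]), hsk]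
        rw [pvRep_head _ _ _ (by rw [pvTok]; simp), ih g hg]
      · -- another still-unprocessed token: mismatch everywhere inside the chunk
        rw [if_neg hgk, if_neg (by simp [hsk, hgk]), pvRep_skip _ _ _ _ (fun j hj hpre => ?_),
          ih g hg]
        by_cases hj0 : j = 0
        · subst hj0
          rw [List.drop_zero] at hpre
          rw [pvTok, pvTok, List.cons_append] at hpre
          rcases List.cons_prefix_cons.mp hpre with ⟨-, h2⟩
          have h2' : pvSK kv0 ++ ']' :: [] <+: pvSK kv ++ (']' :: []) ++ pvDen1 g (pvParse m r) := by
            simpa using h2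
          have := pvMgen ']' [] (pvDen1 g (pvParse m r)) (pvSK kv0) (pvSK kv)
            (fun hm => ((pvGood_sk kv0).2 _ hm).2.1 rfl)
            (fun hm => ((pvGood_sk kv).2 _ hm).2.1 rfl) h2'
          exact hsk this.symm
        · have h0 := pvPrefix_getElem? hpre 0 (by rw [pvTok]; simp)
          rw [List.getElem?_drop, Nat.add_zero,
            List.getElem?_append_left (by simpa using hj),
            show (pvTok (pvSK kv0))[0]? = some '[' from by rw [pvTok]; rfl] at h0
          exact pvTok_no_lb (pvSK kv) (pvGood_sk kv) j (by omega) h0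
  | case3 t hno ih =>
    intro g hg
    rw [pvParse_lb_no m t hno, pvDen1, pvDen1]
    rw [pvRep_cons_neg _ _ _ _ (pvNoTokRaw m kv0 hkv0 t g hno), ih g hg]
  | case4 c t hc ih =>
    intro g hg
    rw [pvParse_cons m c t hc, pvDen1, pvDen1]
    have : ¬ pvTok (pvSK kv0) <+: c :: pvDen1 g (pvParse m t) := by
      intro h
      rw [pvTok] at h
      exact hc (List.cons_prefix_cons.mp h).1.symm
    rw [pvRep_cons_neg _ _ _ _ this, ih g hg]

-- convenience: infix closure through cons / suffix parts
theorem pvInfix_cons {p t : List Char} (c : Char) (h : p <:+: t) : p <:+: c :: t := by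
  rcases h with ⟨a, b, rfl⟩
  exact ⟨c :: a, b, rfl⟩

theorem pvND_of_token {p t : List Char} {x : Char} {r : List Char}
    (hd : t.dropWhile (· ≠ ']') = x :: r) (h : ¬ p <:+: '[' :: t) : ¬ p <:+: r := by
  intro hr
  apply h
  apply pvInfix_cons
  have : r <:+ t := by
    have h1 : t.dropWhile (· ≠ ']') <:+ t := List.dropWhile_suffix _
    rw [hd] at h1
    exact (List.suffix_cons x r).trans h1
  exact hr.trans this.isInfix

theorem pvND_of_cons {p t : List Char} (c : Char) (h : ¬ p <:+: c :: t) : ¬ p <:+: t :=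
  fun hr => h (pvInfix_cons c hr)

-- the pattern head at the start of a raw character forces a sentinel in the input
theorem pvNoPHRaw (m : List (Int × Int)) (σ : List Char) (hσ : pvGood σ)
    (c : Char) (t : List Char) (g : List Char → Bool)
    (hnd : ¬ (pvPL.drop 2 ++ σ) <:+: c :: t) :
    ¬ pvPH σ <+: c :: pvDen2 g (pvParse m t) := by
  intro h
  rw [pvPH_two_cons] at h
  rcases List.cons_prefix_cons.mp h with ⟨rfl, h2⟩
  have h2' : (pvPH σ).drop 1 <+: pvDen2 g (pvParse m t) := by
    rw [pvPH_two_cons]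
    simpa using h2
  have hwalk := pvL2main m σ hσ t g 1 (by omega) (by omega) h2'
  rw [pvPH_drop_slice σ 1 (by omega)] at hwalk
  apply hnd
  apply pvInfix_cons
  have hstep : pvPL.drop 2 ++ σ <:+: pvPL.drop 1 ++ σ := by
    rw [show pvPL.drop 1 = '_' :: pvPL.drop 2 from by decide, List.cons_append]
    exact (List.suffix_cons '_' _).isInfix
  exact hstep.trans hwalk.isInfix

-- phase-2 step: replacing one placeholder by its final citation in the denotation
theorem pvStep2 (m : List (Int × Int)) (hnodup : (m.map pvSK).Nodup)
    (kv0 : Int × Int) (hkv0 : kv0 ∈ m) (cs : List Char) :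
    ∀ g : List Char → Bool, g (pvSK kv0) = false →
      ¬ (pvPL.drop 2 ++ pvSK kv0) <:+: cs →
      pvRep (pvPH (pvSK kv0)) (pvRV kv0) (pvDen2 g (pvParse m cs))
        = pvDen2 (fun τ => τ == pvSK kv0 || g τ) (pvParse m cs) := by
  have hgood0 := pvGood_sk kv0
  induction cs using pvParse.induct m with
  | case1 =>
    intro g hg hnd
    rw [pvParse_nil, pvDen2, pvDen2, pvRep_nil]
  | case2 t x r kv hd hf ih =>
    intro g hg hnd
    have hndr : ¬ (pvPL.drop 2 ++ pvSK kv0) <:+: r := pvND_of_token hd hnd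
    rw [pvParse_tok m t x r kv hd hf, pvDen2, pvDen2]
    by_cases hgk : g (pvSK kv)
    · -- already replaced: pvRV kv contains no '_', pattern head is '_'
      have hne : pvSK kv ≠ pvSK kv0 := fun he => by rw [he, hg] at hgk; exact Bool.noConfusion hgk
      rw [if_pos hgk, if_pos (by simp [hne, hgk])]
      rw [pvRep_skip _ _ _ _ (fun j hj hpre => ?_), ih g hg hndr]
      have h0 := pvPrefix_getElem? hpre 0 (by rw [pvPH_length]; simp)
      rw [List.getElem?_drop, Nat.add_zero,
        List.getElem?_append_left (by simpa using hj),
        show (pvPH (pvSK kv0))[0]? = some '_' from by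
          rw [pvPH_getElem?_left _ 0 (by omega)]; decide] at h0
      exact pvRV_no_us kv (List.mem_of_getElem? h0)
    · by_cases hsk : pvSK kv = pvSK kv0
      · -- the processed key: kv = kv0 by nodup, genuine replacement
        have hkvkv0 : kv = kv0 := by
          have hinj := List.inj_on_of_nodup_map hnodup
          exact hinj (pvParse_mem (m := m) (cs := '[' :: t) (by
            rw [pvParse_tok m t x r kv hd hf]; simp)) hkv0 hsk
        subst hkvkv0
        rw [if_neg hgk, if_pos (by simp)]
        rw [pvRep_head _ _ _ (by rw [pvPH]; simp [pvPL]), ih g hg hndr]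
      · -- another placeholder chunk: no occurrence anywhere inside it
        rw [if_neg hgk, if_neg (by simp [hsk, hgk]), pvRep_skip _ _ _ _ (fun j hj hpre => ?_),
          ih g hg hndr]
        rw [pvPH_length] at hj
        by_cases hj0 : j = 0
        · subst hj0
          rw [List.drop_zero, pvPH, pvPH] at hpre
          rw [show pvPL ++ pvSK kv0 ++ ['_','_'] = pvPL ++ (pvSK kv0 ++ ['_','_']) from by
            rw [List.append_assoc]] at hpre
          rw [show (pvPL ++ pvSK kv ++ ['_','_']) ++ pvDen2 g (pvParse m r)
              = pvPL ++ ((pvSK kv ++ ['_','_']) ++ pvDen2 g (pvParse m r)) from by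
            simp [List.append_assoc]] at hpre
          have h2 := (List.prefix_append_right_inj pvPL).mp hpre
          have h2' : pvSK kv0 ++ '_' :: ['_'] <+: pvSK kv ++ ('_' :: ['_']) ++ pvDen2 g (pvParse m r) := by
            simpa using h2
          have := pvMgen '_' ['_'] (pvDen2 g (pvParse m r)) (pvSK kv0) (pvSK kv)
            (fun hm => (hgood0.2 _ hm).2.2 rfl)
            (fun hm => ((pvGood_sk kv).2 _ hm).2.2 rfl) h2'
          exact hsk this.symm
        · by_cases hj13 : j ≤ 13 + (pvSK kv).length
          · -- two adjacent underscores inside the other placeholder: impossible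
            have h0 := pvPrefix_getElem? hpre 0 (by rw [pvPH_length]; simp)
            rw [List.getElem?_drop, Nat.add_zero,
              List.getElem?_append_left (by rw [pvPH_length]; omega),
              show (pvPH (pvSK kv0))[0]? = some '_' from by
                rw [pvPH_getElem?_left _ 0 (by omega)]; decide] at h0
            have h1 := pvPrefix_getElem? hpre 1 (by rw [pvPH_length]; omega)
            rw [List.getElem?_drop,
              List.getElem?_append_left (by rw [pvPH_length]; omega),
              show (pvPH (pvSK kv0))[1]? = some '_' from by
                rw [pvPH_getElem?_left _ 1 (by omega)]; decide] at h1
            exact pvPH_adj (pvSK kv) (pvGood_sk kv) j (by omega) hj13 ⟨h0, h1⟩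
          · -- inside the trailing "__": the rest of the pattern walks into raw input
            have hcase : j = 14 + (pvSK kv).length ∨ j = 15 + (pvSK kv).length := by omega
            have hdropj : (pvPH (pvSK kv) ++ pvDen2 g (pvParse m r)).drop j
                = (pvPH (pvSK kv)).drop j ++ pvDen2 g (pvParse m r) :=
              List.drop_append_of_le_length (by rw [pvPH_length]; omega)
            rcases hcase with hj14 | hj15
            · subst hj14
              rw [hdropj, pvPH_drop_big, pvPH_two_cons] at hpre
              have h2' : (pvPH (pvSK kv0)).drop 2 <+: pvDen2 g (pvParse m r) := by
                rw [pvPH_two_cons]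
                simpa using hpre
              have hwalk := pvL2main m (pvSK kv0) hgood0 r g 2 (by omega) (by
                have := hgood0.1
                have : (pvSK kv0).length ≠ 0 := fun h0 => this (List.length_eq_zero_iff.mp h0)
                omega) h2'
              rw [pvPH_drop_slice _ 2 (by omega)] at hwalk
              exact hndr hwalk.isInfix
            · subst hj15
              rw [hdropj,
                show (pvPH (pvSK kv)).drop (15 + (pvSK kv).length)
                  = ['_'] from by
                    rw [show 15 + (pvSK kv).length = (14 + (pvSK kv).length) + 1 from by omega,
                      ← List.drop_drop, pvPH_drop_big]; rfl] at hpre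
              rw [pvPH_two_cons] at hpre
              have h2' : (pvPH (pvSK kv0)).drop 1 <+: pvDen2 g (pvParse m r) := by
                rw [pvPH_two_cons]
                simpa using hpre
              have hwalk := pvL2main m (pvSK kv0) hgood0 r g 1 (by omega) (by omega) h2'
              rw [pvPH_drop_slice _ 1 (by omega)] at hwalk
              apply hndr
              have hstep : pvPL.drop 2 ++ pvSK kv0 <:+: pvPL.drop 1 ++ pvSK kv0 := by
                rw [show pvPL.drop 1 = '_' :: pvPL.drop 2 from by decide, List.cons_append]
                exact (List.suffix_cons '_' _).isInfix
              exact hstep.trans hwalk.isInfix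
  | case3 t hno ih =>
    intro g hg hnd
    rw [pvParse_lb_no m t hno, pvDen2, pvDen2]
    rw [pvRep_cons_neg _ _ _ _ (pvNoPHRaw m (pvSK kv0) hgood0 '[' t g hnd),
      ih g hg (pvND_of_cons '[' hnd)]
  | case4 c t hc ih =>
    intro g hg hnd
    rw [pvParse_cons m c t hc, pvDen2, pvDen2]
    rw [pvRep_cons_neg _ _ _ _ (pvNoPHRaw m (pvSK kv0) hgood0 c t g hnd),
      ih g hg (pvND_of_cons c hnd)]

-- ---- folding phase 1 over the whole citation map ----
theorem pvFold1 (m : List (Int × Int)) (cs : List Char) :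
    ∀ (rest pre : List (Int × Int)), m = pre ++ rest → (m.map pvSK).Nodup →
      rest.foldl (fun acc kv => pvRep (pvTok (pvSK kv)) (pvPH (pvSK kv)) acc)
        (pvDen1 (fun τ => decide (τ ∈ pre.map pvSK)) (pvParse m cs))
      = pvDen1 (fun τ => decide (τ ∈ m.map pvSK)) (pvParse m cs) := by
  intro rest
  induction rest with
  | nil =>
    intro pre hm _
    rw [List.foldl_nil, hm, List.append_nil]
  | cons kv rest ih =>
    intro pre hm hnd
    rw [List.foldl_cons]
    have hkvm : kv ∈ m := by rw [hm]; simp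
    have hgfalse : decide ((pvSK kv) ∈ pre.map pvSK) = false := by
      simp only [decide_eq_false_iff_not]
      intro hmem
      rw [hm, List.map_append] at hnd
      rcases List.nodup_append.mp hnd with ⟨-, -, hdisj⟩
      have hmem2 : pvSK kv ∈ (kv :: rest).map pvSK := List.mem_map.mpr ⟨kv, by simp, rfl⟩
      exact hdisj _ hmem _ hmem2 rfl
    rw [pvStep1 m kv hkvm cs _ hgfalse]
    have hrec := ih (pre ++ [kv]) (by rw [hm]; simp) hnd
    rw [← hrec]
    congr 1
    apply pvDen1_congr
    intro kv' _
    simp only [List.map_append, List.mem_append, List.map_cons, List.map_nil,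
      List.mem_singleton, Bool.decide_or]
    cases hb : (pvSK kv' == pvSK kv) with
    | true => simp [beq_iff_eq.mp hb]
    | false => simp [(beq_iff_eq (a := pvSK kv')).symm, hb]

theorem pvFold2 (m : List (Int × Int)) (cs : List Char) :
    ∀ (rest pre : List (Int × Int)), m = pre ++ rest → (m.map pvSK).Nodup →
      (∀ kv ∈ m, ¬ (pvPL.drop 2 ++ pvSK kv) <:+: cs) →
      rest.foldl (fun acc kv => pvRep (pvPH (pvSK kv)) (pvRV kv) acc)
        (pvDen2 (fun τ => decide (τ ∈ pre.map pvSK)) (pvParse m cs))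
      = pvDen2 (fun τ => decide (τ ∈ m.map pvSK)) (pvParse m cs) := by
  intro rest
  induction rest with
  | nil =>
    intro pre hm _ _
    rw [List.foldl_nil, hm, List.append_nil]
  | cons kv rest ih =>
    intro pre hm hnd hndall
    rw [List.foldl_cons]
    have hkvm : kv ∈ m := by rw [hm]; simp
    have hgfalse : decide ((pvSK kv) ∈ pre.map pvSK) = false := by
      simp only [decide_eq_false_iff_not]
      intro hmem
      rw [hm, List.map_append] at hnd
      rcases List.nodup_append.mp hnd with ⟨-, -, hdisj⟩
      have hmem2 : pvSK kv ∈ (kv :: rest).map pvSK := List.mem_map.mpr ⟨kv, by simp, rfl⟩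
      exact hdisj _ hmem _ hmem2 rfl
    rw [pvStep2 m hnd kv hkvm cs _ hgfalse (hndall kv hkvm)]
    have hrec := ih (pre ++ [kv]) (by rw [hm]; simp) hnd hndall
    rw [← hrec]
    congr 1
    apply pvDen2_congr
    intro kv' _
    simp only [List.map_append, List.mem_append, List.map_cons, List.map_nil,
      List.mem_singleton, Bool.decide_or]
    cases hb : (pvSK kv' == pvSK kv) with
    | true => simp [beq_iff_eq.mp hb]
    | false => simp [(beq_iff_eq (a := pvSK kv')).symm, hb]

theorem pvDen1_start (m : List (Int × Int)) (cs : List Char) :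
    pvDen1 (fun τ => decide (τ ∈ ([] : List (Int × Int)).map pvSK)) (pvParse m cs) = cs := by
  conv_rhs => rw [← pvParse_denote m cs]
  apply pvDen1_congr
  intro kv _
  simp

theorem pvDen1_full (m : List (Int × Int)) (cs : List Char) :
    pvDen1 (fun τ => decide (τ ∈ m.map pvSK)) (pvParse m cs)
      = pvDen1 (fun _ => true) (pvParse m cs) := by
  apply pvDen1_congr
  intro kv hkv
  have h : pvSK kv ∈ m.map pvSK := List.mem_map.mpr ⟨kv, pvParse_mem hkv, rfl⟩
  simp [h]

theorem pvDen2_start (m : List (Int × Int)) (cs : List Char) :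
    pvDen2 (fun τ => decide (τ ∈ ([] : List (Int × Int)).map pvSK)) (pvParse m cs)
      = pvDen2 (fun _ => false) (pvParse m cs) := by
  apply pvDen2_congr
  intro kv _
  simp

theorem pvDen2_full (m : List (Int × Int)) (cs : List Char) :
    pvDen2 (fun τ => decide (τ ∈ m.map pvSK)) (pvParse m cs)
      = pvDen2 (fun _ => true) (pvParse m cs) := by
  apply pvDen2_congr
  intro kv hkv
  have h : pvSK kv ∈ m.map pvSK := List.mem_map.mpr ⟨kv, pvParse_mem hkv, rfl⟩
  simp [h]

-- ---- the scanner computes the fully-replaced denotation ----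
theorem pvDropWhile_head_lb (l : List Char) (c : Char) (r : List Char)
    (h : l.dropWhile (· ≠ '[') = c :: r) : c = '[' := by
  induction l with
  | nil => simp at h
  | cons a t ih =>
    by_cases ha : a = '['
    · subst ha; rw [List.dropWhile_cons_of_neg (by simp)] at h
      exact (List.cons.injEq .. ▸ h).1.symm
    · rw [List.dropWhile_cons_of_pos (by simpa using ha)] at h
      exact ih h

theorem pvParse_no_rb (m : List (Int × Int)) (g : List Char → Bool) :
    ∀ t : List Char, (∀ a ∈ t, a ≠ ']') → pvDen2 g (pvParse m t) = t := by
  intro t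
  induction t using pvParse.induct m with
  | case1 => intro _; rw [pvParse_nil]; rfl
  | case2 t x r kv hd hf ih =>
    intro hno
    exfalso
    have hx : x ∈ t.dropWhile (· ≠ ']') := by rw [hd]; simp
    have : x ∈ t := (List.dropWhile_sublist _).subset hx
    exact hno x (by simp [this]) (pvDropWhile_head_rb t x r hd)
  | case3 t hno ih =>
    intro hnr
    rw [pvParse_lb_no m t hno, pvDen2, ih (fun a ha => hnr a (by simp [ha]))]
  | case4 c t hc ih =>
    intro hnr
    rw [pvParse_cons m c t hc, pvDen2, ih (fun a ha => hnr a (by simp [ha]))]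

theorem pvParse_raw_append (m : List (Int × Int)) (g : List Char → Bool) :
    ∀ (w z : List Char), (∀ a ∈ w, a ≠ '[') →
      pvDen2 g (pvParse m (w ++ z)) = w ++ pvDen2 g (pvParse m z) := by
  intro w
  induction w with
  | nil => intro z _; simp
  | cons a w ih =>
    intro z hw
    rw [List.cons_append, pvParse_cons m a (w ++ z) (hw a (by simp)), pvDen2,
      ih z (fun b hb => hw b (by simp [hb])), List.cons_append]

theorem pvParse_no_lb (m : List (Int × Int)) (g : List Char → Bool)
    (t : List Char) (h : ∀ a ∈ t, a ≠ '[') : pvDen2 g (pvParse m t) = t := by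
  have := pvParse_raw_append m g t [] h
  rw [pvParse_nil] at this
  simpa [pvDen2] using this

-- ---- the dict built by Source B answers exactly like first-match on the map ----
theorem pvTokKey (a b : List Char) :
    (('[' :: a ++ [']'] : List Char) == ('[' :: b ++ [']'])) = (a == b) := by
  by_cases h : a = b
  · simp [h]
  · have hne : ('[' :: a ++ [']'] : List Char) ≠ '[' :: b ++ [']'] := by
      intro he
      apply h
      have := List.cons.injEq .. ▸ he
      simpa [List.append_left_inj] using this.2
    simp [h, hne]

theorem pvDictB_eq (m : List (Int × Int)) :
    pvDictB m = m.foldl (fun d kv => d.insert (pvTok (pvSK kv)) (pvRV kv)) PySem.Dict.empty := rfl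

theorem pvDictAux (key : List Char) :
    ∀ (l : List (Int × Int)) (d0 : PySem.Dict (List Char) (List Char)),
      (∀ kv ∈ l, ∀ kv' ∈ l, pvSK kv = pvSK kv' → kv = kv') →
      (l.foldl (fun d kv => d.insert (pvTok (pvSK kv)) (pvRV kv)) d0).get? key
        = match l.find? (fun kv => pvTok (pvSK kv) == key) with
          | some kv => some (pvRV kv)
          | none => d0.get? key := by
  intro l
  induction l with
  | nil => intro d0 _; rw [List.foldl_nil, List.find?_nil]
  | cons kv l ih =>
    intro d0 huniq
    rw [List.foldl_cons, ih _ (fun a ha a' ha' => huniq a (by simp [ha]) a' (by simp [ha']))]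
    cases hfl : l.find? (fun kv => pvTok (pvSK kv) == key) with
    | some kv' =>
      cases hpk : (pvTok (pvSK kv) == key) with
      | true =>
        rw [List.find?_cons_of_pos (p := fun kv => pvTok (pvSK kv) == key) hpk]
        have hk1 : pvTok (pvSK kv) = key := by simpa using hpk
        have hk2 : pvTok (pvSK kv') = key := by simpa using List.find?_some hfl
        have hsk : pvSK kv = pvSK kv' := by
          have : pvTok (pvSK kv) = pvTok (pvSK kv') := by rw [hk1, hk2]
          have hb := pvTokKey (pvSK kv) (pvSK kv')
          rw [pvTok, pvTok] at this
          simpa using this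
        rw [huniq kv (by simp) kv' (by simp [List.mem_of_find?_eq_some hfl]) hsk]
      | false =>
        rw [List.find?_cons_of_neg (p := fun kv => pvTok (pvSK kv) == key) (by simp [hpk]), hfl]
    | none =>
      cases hpk : (pvTok (pvSK kv) == key) with
      | true =>
        rw [List.find?_cons_of_pos (p := fun kv => pvTok (pvSK kv) == key) hpk]
        have hk1 : pvTok (pvSK kv) = key := by simpa using hpk
        rw [← hk1, PySem.Dict.get?_insert_self]
      | false =>
        rw [List.find?_cons_of_neg (p := fun kv => pvTok (pvSK kv) == key) (by simp [hpk]), hfl]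
        rw [PySem.Dict.get?_insert_of_ne _ _ (by
          intro he
          rw [he] at hpk
          simp at hpk)]

theorem pvDict_get (m : List (Int × Int)) (hnodup : (m.map pvSK).Nodup) (inner : List Char) :
    (pvDictB m).get? ('[' :: inner ++ [']']) = (pvFind m inner).map pvRV := by
  rw [pvDictB_eq, pvDictAux ('[' :: inner ++ [']']) m PySem.Dict.empty
    (fun a ha a' ha' => List.inj_on_of_nodup_map hnodup ha ha')]
  have hpred : (fun kv => pvTok (pvSK kv) == ('[' :: inner ++ [']'])) =
      (fun kv => pvSK kv == inner) := by
    funext kv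
    rw [pvTok, pvTokKey]
  rw [hpred]
  rw [pvFind]
  cases m.find? (fun kv => pvSK kv == inner) with
  | some kv => rfl
  | none => rw [PySem.Dict.get?_empty]; rfl

theorem pvScanGo_succ_nil (d : PySem.Dict (List Char) (List Char)) (f : Nat) (l : List Char)
    (h : l.dropWhile (· ≠ '[') = []) : pvScanGo d (f + 1) l = l := by
  rw [pvScanGo, h]

theorem pvScanGo_succ_norb (d : PySem.Dict (List Char) (List Char)) (f : Nat) (l : List Char)
    (c : Char) (t : List Char) (h : l.dropWhile (· ≠ '[') = c :: t)
    (h2 : t.dropWhile (· ≠ ']') = []) :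
    pvScanGo d (f + 1) l = l.takeWhile (· ≠ '[') ++ (c :: t) := by
  rw [pvScanGo, h]
  dsimp only
  rw [h2]

theorem pvScanGo_succ_hit (d : PySem.Dict (List Char) (List Char)) (f : Nat) (l : List Char)
    (c : Char) (t : List Char) (x : Char) (r repl : List Char)
    (h : l.dropWhile (· ≠ '[') = c :: t) (h2 : t.dropWhile (· ≠ ']') = x :: r)
    (h3 : d.get? ('[' :: t.takeWhile (· ≠ ']') ++ [']']) = some repl) :
    pvScanGo d (f + 1) l = l.takeWhile (· ≠ '[') ++ (repl ++ pvScanGo d f r) := by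
  rw [pvScanGo, h]
  dsimp only
  rw [h2]
  dsimp only
  rw [h3]

theorem pvScanGo_succ_miss (d : PySem.Dict (List Char) (List Char)) (f : Nat) (l : List Char)
    (c : Char) (t : List Char) (x : Char) (r : List Char)
    (h : l.dropWhile (· ≠ '[') = c :: t) (h2 : t.dropWhile (· ≠ ']') = x :: r)
    (h3 : d.get? ('[' :: t.takeWhile (· ≠ ']') ++ [']']) = none) :
    pvScanGo d (f + 1) l = l.takeWhile (· ≠ '[') ++ (c :: pvScanGo d f t) := by
  rw [pvScanGo, h]
  dsimp only
  rw [h2]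
  dsimp only
  rw [h3]

-- the scanner equals the phase-2 denotation with every key processed
theorem pvScan_eq (m : List (Int × Int)) (hnodup : (m.map pvSK).Nodup) :
    ∀ (fuel : Nat) (cs : List Char), cs.length ≤ fuel →
      pvScanGo (pvDictB m) fuel cs = pvDen2 (fun _ => true) (pvParse m cs) := by
  intro fuel
  induction fuel with
  | zero =>
    intro cs h
    have : cs = [] := List.length_eq_zero_iff.mp (Nat.le_zero.mp h)
    subst this
    rw [pvParse_nil]; rfl
  | succ f ih =>
    intro cs hlen
    cases hdw : cs.dropWhile (· ≠ '[') with
    | nil =>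
      rw [pvScanGo_succ_nil _ _ _ hdw]
      rw [pvParse_no_lb m _ cs (by
        intro a ha
        have := List.dropWhile_eq_nil_iff.mp hdw
        simpa using this a ha)]
    | cons c t =>
      have hc : c = '[' := pvDropWhile_head_lb cs c t hdw
      subst hc
      have hcs : cs.takeWhile (· ≠ '[') ++ '[' :: t = cs := by
        have := List.takeWhile_append_dropWhile (p := (· ≠ '[')) (l := cs)
        rw [hdw] at this
        exact this
      have hw : ∀ a ∈ cs.takeWhile (· ≠ '['), a ≠ '[' := by
        intro a ha
        simpa using List.mem_takeWhile_imp ha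
      have hlist : pvDen2 (fun _ => true) (pvParse m cs)
          = cs.takeWhile (· ≠ '[') ++ pvDen2 (fun _ => true) (pvParse m ('[' :: t)) := by
        conv_lhs => rw [← hcs]
        exact pvParse_raw_append m _ _ _ hw
      rw [hlist]
      have hlent : t.length + 1 ≤ cs.length := by
        conv_rhs => rw [← hcs]
        simp
      cases hdt : t.dropWhile (· ≠ ']') with
      | nil =>
        have hno : ∀ (x : Char) (r : List Char) (kv : Int × Int),
            t.dropWhile (· ≠ ']') = x :: r → pvFind m (t.takeWhile (· ≠ ']')) = some kv → False := by
          intro x r kv hdd _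
          rw [hdt] at hdd
          cases hdd
        rw [pvScanGo_succ_norb _ _ _ _ _ hdw hdt]
        rw [pvParse_lb_no m t hno, pvDen2]
        rw [pvParse_no_rb m _ t (by
          intro a ha
          have := List.dropWhile_eq_nil_iff.mp hdt
          simpa using this a ha)]
      | cons x r =>
        have hget := pvDict_get m hnodup (t.takeWhile (· ≠ ']'))
        cases hfd : pvFind m (t.takeWhile (· ≠ ']')) with
        | some kv =>
          rw [hfd, Option.map_some] at hget
          have hlenr : r.length ≤ f := by
            have h1 : (t.dropWhile (· ≠ ']')).length ≤ t.length := List.length_dropWhile_le _ _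
            rw [hdt] at h1
            simp at h1
            omega
          rw [pvScanGo_succ_hit _ _ _ _ _ _ _ _ hdw hdt hget]
          rw [ih r hlenr, pvParse_tok m t x r kv hdt hfd, pvDen2, if_pos rfl]
        | none =>
          rw [hfd, Option.map_none] at hget
          have hno : ∀ (x' : Char) (r' : List Char) (kv : Int × Int),
              t.dropWhile (· ≠ ']') = x' :: r' → pvFind m (t.takeWhile (· ≠ ']')) = some kv → False := by
            intro x' r' kv _ hff
            rw [hfd] at hff
            cases hff
          rw [pvScanGo_succ_miss _ _ _ _ _ _ _ hdw hdt hget]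
          rw [ih t (by omega), pvParse_lb_no m t hno, pvDen2]

-- ---- port A over lists ----
theorem pvTokStr (k : Int) : ("[" ++ PySem.Int.toStr k ++ "]").toList
    = pvTok (PySem.Int.toStr k).toList := by
  rw [pvTok]
  simp [String.toList_append]

theorem pvPHStr (k : Int) : ("__PLACEHOLDER_" ++ PySem.Int.toStr k ++ "__").toList
    = pvPH (PySem.Int.toStr k).toList := by
  rw [pvPH, pvPL]
  simp [String.toList_append]

theorem pvLoopA1 (l : List (Int × Int)) :
    ∀ a : String,
      (l.foldl (fun acc kv => PySem.Str.replace acc ("[" ++ PySem.Int.toStr kv.1 ++ "]")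
        ("__PLACEHOLDER_" ++ PySem.Int.toStr kv.1 ++ "__")) a).toList
      = l.foldl (fun acc kv => pvRep (pvTok (pvSK kv)) (pvPH (pvSK kv)) acc) a.toList := by
  induction l with
  | nil => intro a; rw [List.foldl_nil, List.foldl_nil]
  | cons kv l ih =>
    intro a
    rw [List.foldl_cons, List.foldl_cons, ih]
    congr 1
    rw [PySem.Str.toList_replace, pvTokStr, pvPHStr,
      pvRep_eq_replace _ _ (by rw [pvTok]; simp)]
    rfl

theorem pvRVStr (k : Int) : ("[" ++ PySem.Int.toStr k ++ "]").toList
    = '[' :: (PySem.Int.toStr k).toList ++ [']'] := by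
  simp [String.toList_append]

theorem pvLoopA2 (l : List (Int × Int)) :
    ∀ a : String,
      (l.foldl (fun acc kv => PySem.Str.replace acc ("__PLACEHOLDER_" ++ PySem.Int.toStr kv.1 ++ "__")
        ("[" ++ PySem.Int.toStr kv.2 ++ "]")) a).toList
      = l.foldl (fun acc kv => pvRep (pvPH (pvSK kv)) (pvRV kv) acc) a.toList := by
  induction l with
  | nil => intro a; rw [List.foldl_nil, List.foldl_nil]
  | cons kv l ih =>
    intro a
    rw [List.foldl_cons, List.foldl_cons, ih]
    congr 1
    rw [PySem.Str.toList_replace, pvPHStr,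
      pvRep_eq_replace _ _ (by rw [pvPH]; simp [pvPL])]
    congr 1
    rw [pvRV, pvRVStr]
    rfl

-- ---- the main equation over lists ----
theorem pvMain (m : List (Int × Int)) (cs : List Char)
    (hnodup : (m.map pvSK).Nodup)
    (hnd : ∀ kv ∈ m, ¬ (pvPL.drop 2 ++ pvSK kv) <:+: cs) :
    m.foldl (fun acc kv => pvRep (pvPH (pvSK kv)) (pvRV kv) acc)
      (m.foldl (fun acc kv => pvRep (pvTok (pvSK kv)) (pvPH (pvSK kv)) acc) cs)
    = pvScanGo (pvDictB m) cs.length cs := by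
  have h1 := pvFold1 m cs m [] rfl hnodup
  rw [pvDen1_start] at h1
  have h2 := pvFold2 m cs m [] rfl hnodup hnd
  rw [pvDen2_start] at h2
  rw [h1, pvDen1_full, pvDen1_true_eq_den2_false, h2, pvDen2_full,
    pvScan_eq m hnodup cs.length cs le_rfl]

-- ===== VERDICT (by name: the statement is the Claim_ definition above) =====
theorem update_citation_index_spec : Claim_equal_update_citation_index := by
  intro s m _hdom hpre
  have hnodup : (m.map pvSK).Nodup := by
    have : m.map pvSK = (m.map (fun kv => PySem.Int.toStr kv.1)).map String.toList := by
      rw [List.map_map]; rfl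
    rw [this]
    exact hpre.1.map (fun a b h => String.toList_inj.mp h)
  have hnd : ∀ kv ∈ m, ¬ (pvPL.drop 2 ++ pvSK kv) <:+: s.toList := by
    intro kv hkv hinf
    apply hpre.2 kv hkv
    rw [String.toList_append, show "PLACEHOLDER_".toList = pvPL.drop 2 from by decide]
    exact hinf
  show update_citation_index s m = update_citation_index_alt s m
  apply String.toList_inj.mp
  rw [update_citation_index_alt, String.toList_ofList]
  show (m.foldl (fun acc kv => PySem.Str.replace acc ("__PLACEHOLDER_" ++ PySem.Int.toStr kv.1 ++ "__")
        ("[" ++ PySem.Int.toStr kv.2 ++ "]"))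
      (m.foldl (fun acc kv => PySem.Str.replace acc ("[" ++ PySem.Int.toStr kv.1 ++ "]")
        ("__PLACEHOLDER_" ++ PySem.Int.toStr kv.1 ++ "__")) s)).toList = _
  rw [pvLoopA2, pvLoopA1]
  exact pvMain m s.toList hnodup hnd
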